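-- pv_equiv track=rewrite | github.com/Matthieu5555/prospectus_reading | extractor/core/smart_chunker.py | _find_chunk_end
-- ===== SOURCE A (Python) =====
-- def _find_chunk_end(
--     start: int,
--     boundaries: list[int],
--     total_pages: int,
--     max_size: int,
--     min_size: int,
-- ) -> int:
--     """Find the best end page for a chunk starting at 'start'.
--
--     Prefers to end at a section boundary if possible.
--     """
--     # Maximum possible end
--     max_end = min(start + max_size - 1, total_pages)
--
--     # Find boundaries in the valid range
--     valid_boundaries = [
--         b - 1 for b in boundaries
--         if start + min_size <= b <= max_end + 1
--     ]
--
--     if valid_boundaries: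
--         # Prefer the largest boundary that fits (most content per chunk)
--         return max(valid_boundaries)
--
--     # No boundary in range - just use max_end
--     return max_end
-- ===== SOURCE B (Python) =====
-- def _find_chunk_end(
--     start: int,
--     boundaries: list[int],
--     total_pages: int,
--     max_size: int,
--     min_size: int,
-- ) -> int:
--     """Sort the boundaries once, then binary-search for the rightmost
--     boundary <= max_end + 1; it is the answer iff it also reaches start + min_size."""
--     max_end = min(start + max_size - 1, total_pages)
--     lo_val = start + min_size
--     hi_val = max_end + 1
--     bs = sorted(boundaries)
--     # hand-rolled bisect_right(bs, hi_val)
--     lo, hi = 0, len(bs)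
--     while lo < hi:
--         mid = (lo + hi) // 2
--         if bs[mid] <= hi_val:
--             lo = mid + 1
--         else:
--             hi = mid
--     if lo > 0 and bs[lo - 1] >= lo_val:
--         return bs[lo - 1] - 1
--     return max_end
-- ===== Notes on version B (the rewrite author's own statement) =====
-- stated objective: alternative
-- what changed: Instead of filtering-and-shifting the boundary list and taking max(), B sorts the boundaries once and binary-searches for the rightmost boundary <= max_end+1, then checks it against start+min_size.
import Mathlib
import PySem

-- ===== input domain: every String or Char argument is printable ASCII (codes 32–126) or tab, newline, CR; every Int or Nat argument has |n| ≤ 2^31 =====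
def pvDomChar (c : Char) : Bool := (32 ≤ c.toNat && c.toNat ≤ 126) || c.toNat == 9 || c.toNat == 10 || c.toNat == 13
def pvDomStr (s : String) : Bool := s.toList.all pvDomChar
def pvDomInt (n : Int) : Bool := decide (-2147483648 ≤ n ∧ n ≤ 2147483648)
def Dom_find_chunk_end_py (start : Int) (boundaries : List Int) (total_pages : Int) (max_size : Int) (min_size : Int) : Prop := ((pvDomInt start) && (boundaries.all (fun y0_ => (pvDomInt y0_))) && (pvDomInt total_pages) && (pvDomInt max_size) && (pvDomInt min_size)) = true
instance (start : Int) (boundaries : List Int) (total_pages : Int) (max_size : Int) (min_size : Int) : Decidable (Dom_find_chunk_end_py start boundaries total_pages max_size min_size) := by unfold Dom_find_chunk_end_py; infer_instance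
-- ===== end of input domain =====

-- B sorts the boundaries once and binary-searches for the rightmost boundary ≤ max_end+1
-- instead of A's filter-shift-then-max pass (alternative algorithm, same result).

-- ===== PORT A =====
def find_chunk_end_py (start : Int) (boundaries : List Int) (total_pages : Int) (max_size : Int) (min_size : Int) : Int :=
  let max_end := min (start + max_size - 1) total_pages
  let valid_boundaries :=
    (boundaries.filter (fun b => decide (start + min_size ≤ b) && decide (b ≤ max_end + 1))).map
      (fun b => b - 1)
  match PySem.List.max? valid_boundaries (fun x => x) with
  | some m => m
  | none => max_end

-- ===== PORT B =====
-- B-side helper: the hand-rolled bisect_right loop from Source B (while lo < hi …).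
-- bs[mid] is ported as bs.getD mid 0: exact, because the loop keeps lo ≤ mid < hi ≤ len(bs).
def pvBS (bs : List Int) (hv : Int) (lo hi : Nat) : Nat :=
  if _h : lo < hi then
    let mid := (lo + hi) / 2
    if bs.getD mid 0 ≤ hv then pvBS bs hv (mid + 1) hi else pvBS bs hv lo mid
  else lo
termination_by hi - lo
decreasing_by all_goals omega

def find_chunk_end_py_alt (start : Int) (boundaries : List Int) (total_pages : Int) (max_size : Int) (min_size : Int) : Int :=
  let max_end := min (start + max_size - 1) total_pages
  let lo_val := start + min_size
  let hi_val := max_end + 1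
  let bs := PySem.List.sorted boundaries (fun x => x) false
  let i := pvBS bs hi_val 0 bs.length
  if decide (0 < i) && decide (lo_val ≤ bs.getD (i - 1) 0) then bs.getD (i - 1) 0 - 1
  else max_end

-- ===== PRECONDITION & SPEC =====
def Spec_find_chunk_end_py (start : Int) (boundaries : List Int) (total_pages : Int) (max_size : Int) (min_size : Int) (out : Int) : Prop := out = find_chunk_end_py_alt start boundaries total_pages max_size min_size
instance (start : Int) (boundaries : List Int) (total_pages : Int) (max_size : Int) (min_size : Int) (out : Int) : Decidable (Spec_find_chunk_end_py start boundaries total_pages max_size min_size out) := by unfold Spec_find_chunk_end_py; infer_instance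

-- ===== CLAIM (what is proved, stated in full; the proofs are below) =====
def Claim_equal_find_chunk_end_py : Prop := ∀ (start : Int) (boundaries : List Int) (total_pages : Int) (max_size : Int) (min_size : Int), Dom_find_chunk_end_py start boundaries total_pages max_size min_size → Spec_find_chunk_end_py start boundaries total_pages max_size min_size (find_chunk_end_py start boundaries total_pages max_size min_size)

-- ===== LEMMAS AND PROOFS =====

-- sortedness as index monotonicity (through getD)
theorem pvSorted_getD_mono (bs : List Int) (hs : bs.Pairwise (· ≤ ·))
    {j k : Nat} (hjk : j ≤ k) (hk : k < bs.length) :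
    bs.getD j 0 ≤ bs.getD k 0 := by
  rcases Nat.eq_or_lt_of_le hjk with rfl | hlt
  · exact le_refl _
  · have hj : j < bs.length := by omega
    rw [List.getD_eq_getElem bs 0 hj, List.getD_eq_getElem bs 0 hk]
    exact List.pairwise_iff_getElem.mp hs j k hj hk hlt

-- Binary-search invariant: on a sorted list, pvBS returns the split point i
-- with everything before i being ≤ hv and everything from i on being > hv.
theorem pvBS_spec (bs : List Int) (hv : Int) (lo hi : Nat)
    (hs : bs.Pairwise (· ≤ ·))
    (hhi : hi ≤ bs.length) (hlo : lo ≤ hi)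
    (hL : ∀ k, k < lo → bs.getD k 0 ≤ hv)
    (hR : ∀ k, hi ≤ k → k < bs.length → hv < bs.getD k 0) :
    pvBS bs hv lo hi ≤ bs.length ∧
      (∀ k, k < pvBS bs hv lo hi → bs.getD k 0 ≤ hv) ∧
      (∀ k, pvBS bs hv lo hi ≤ k → k < bs.length → hv < bs.getD k 0) := by
  fun_induction pvBS bs hv lo hi with
  | case1 lo hi h mid hle ih =>
    refine ih hhi (by omega) (fun k hk => ?_) hR
    have hmid : mid < bs.length := by omega
    exact le_trans (pvSorted_getD_mono bs hs (j := k) (k := mid) (by omega) hmid) hle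
  | case2 lo hi h mid hgt ih =>
    refine ih (by omega) (by omega) hL (fun k hk hk' => ?_)
    have hmid : mid < bs.length := by omega
    exact lt_of_lt_of_le (lt_of_not_ge hgt)
      (pvSorted_getD_mono bs hs (j := mid) (k := k) hk hk')
  | case3 lo hi h =>
    exact ⟨by omega, fun k hk => hL k hk, fun k hk hk' => hR k (by omega) hk'⟩

-- running max of an Int list is a member …
theorem pvFoldMax_mem (l : List Int) (x : Int) : l.foldl max x ∈ x :: l := by
  induction l generalizing x with
  | nil => simp
  | cons c t ih =>
    simp only [List.foldl, List.mem_cons]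
    have h := ih (max x c)
    simp only [List.mem_cons] at h
    rcases h with h | h
    · rcases max_choice x c with h' | h'
      · exact Or.inl (h.trans h')
      · exact Or.inr (Or.inl (h.trans h'))
    · exact Or.inr (Or.inr h)

-- … and an upper bound of the seed and the list
theorem pvLe_foldMax (l : List Int) (x : Int) : ∀ y ∈ x :: l, y ≤ l.foldl max x := by
  induction l generalizing x with
  | nil => simp
  | cons c t ih =>
    intro y hy
    simp only [List.mem_cons] at hy
    simp only [List.foldl]
    rcases hy with rfl | hy
    · exact le_trans (le_max_left y c) (ih (max y c) _ (by simp))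
    · rcases hy with rfl | hy
      · exact le_trans (le_max_right x y) (ih (max x y) _ (by simp))
      · exact ih (max x c) y (by simp [hy])

theorem pvFoldMax_eq (l : List Int) (x m : Int) (hmem : m ∈ x :: l)
    (hub : ∀ y ∈ x :: l, y ≤ m) : l.foldl max x = m :=
  le_antisymm
    (hub _ (pvFoldMax_mem l x))
    (pvLe_foldMax l x m hmem)

-- ===== VERDICT (by name: the statement is the Claim_ definition above) =====
theorem find_chunk_end_py_spec : Claim_equal_find_chunk_end_py := by
  intro start boundaries total_pages max_size min_size _
  unfold Spec_find_chunk_end_py find_chunk_end_py find_chunk_end_py_alt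
  simp only []
  set me := min (start + max_size - 1) total_pages with hme
  set lov := start + min_size with hlov
  set hv := me + 1 with hhv
  set p : Int → Bool := fun b => decide (lov ≤ b) && decide (b ≤ hv) with hp
  set bs := PySem.List.sorted boundaries (fun x => x) false with hbs
  have hperm : bs.Perm boundaries := PySem.List.sorted_perm boundaries (fun x => x) false
  have hsorted : bs.Pairwise (· ≤ ·) := PySem.List.sorted_pairwise boundaries (fun x => x)
  set i := pvBS bs hv 0 bs.length with hi
  obtain ⟨hile, hbelow, habove⟩ :=
    pvBS_spec bs hv 0 bs.length hsorted (le_refl _) (Nat.zero_le _)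
      (fun k hk => absurd hk (by omega)) (fun k hk hk' => absurd hk (by omega))
  have hfilt : (boundaries.filter p).Perm (bs.filter p) := (hperm.filter p).symm
  by_cases hcond : 0 < i ∧ lov ≤ bs.getD (i - 1) 0
  · -- B takes the boundary branch; show A's max is the same value
    obtain ⟨hipos, hlo⟩ := hcond
    set m := bs.getD (i - 1) 0 with hm
    have hi1 : i - 1 < bs.length := by omega
    have hmhv : m ≤ hv := hbelow (i - 1) (by omega)
    have hpm : p m = true := by
      rw [hp]
      simp only [Bool.and_eq_true, decide_eq_true_eq]
      exact ⟨hlo, hmhv⟩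
    have hmmem : m ∈ bs.filter p := by
      rw [List.mem_filter]
      exact ⟨by rw [hm, List.getD_eq_getElem bs 0 hi1]; exact List.getElem_mem hi1, hpm⟩
    have hub : ∀ y ∈ bs.filter p, y ≤ m := by
      intro y hy
      rw [List.mem_filter] at hy
      obtain ⟨hymem, hyp⟩ := hy
      obtain ⟨k, hk, hkeq⟩ := List.mem_iff_getElem.mp hymem
      have hyhv : y ≤ hv := by simp [hp] at hyp; exact hyp.2
      have hki : k < i := by
        by_contra hge
        have := habove k (by omega) hk
        rw [← List.getD_eq_getElem bs 0 hk] at hkeq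
        omega
      have hmono := pvSorted_getD_mono bs hsorted (j := k) (k := i - 1) (by omega) hi1
      rw [List.getD_eq_getElem bs 0 hk, hkeq] at hmono
      exact hmono
    have hmmem' : m ∈ boundaries.filter p := hfilt.symm.mem_iff.mp hmmem
    have hub' : ∀ y ∈ boundaries.filter p, y ≤ m := fun y hy =>
      hub y (hfilt.mem_iff.mp hy)
    rcases hfl : boundaries.filter p with _ | ⟨x, t⟩
    · rw [hfl] at hmmem'; simp at hmmem'
    · rw [hfl] at hmmem' hub'
      have hmap : (x :: t).map (fun b => b - 1) = (x - 1) :: t.map (fun b => b - 1) := rfl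
      rw [hmap, PySem.List.max?_id_cons]
      have hfm : (t.map (fun b => b - 1)).foldl max (x - 1) = m - 1 := by
        have hmem2 : m - 1 ∈ (x - 1) :: t.map (fun b => b - 1) := by
          rw [List.mem_cons] at hmmem' ⊢
          rcases hmmem' with rfl | h
          · left; rfl
          · right; exact List.mem_map.mpr ⟨m, h, rfl⟩
        have hub2 : ∀ y ∈ (x - 1) :: t.map (fun b => b - 1), y ≤ m - 1 := by
          intro y hy
          rw [List.mem_cons] at hy
          rcases hy with rfl | hy
          · have := hub' x (by simp); omega
          · obtain ⟨z, hz, rfl⟩ := List.mem_map.mp hy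
            have := hub' z (by simp [hz]); omega
        exact pvFoldMax_eq _ _ _ hmem2 hub2
      rw [hfm]
      have hct : (decide (0 < i) && decide (lov ≤ bs.getD (i - 1) 0)) = true := by
        rw [Bool.and_eq_true]
        exact ⟨decide_eq_true hipos, decide_eq_true hlo⟩
      rw [hct, if_pos rfl]
  · -- B falls through to max_end; show A's filtered list is empty
    have hempty : bs.filter p = [] := by
      rw [List.filter_eq_nil_iff]
      intro a hamem hpa
      obtain ⟨k, hk, hkeq⟩ := List.mem_iff_getElem.mp hamem
      simp only [hp, Bool.and_eq_true, decide_eq_true_eq] at hpa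
      have hki : k < i := by
        by_contra hge
        have := habove k (by omega) hk
        rw [← List.getD_eq_getElem bs 0 hk] at hkeq
        omega
      have hipos : 0 < i := by omega
      have hmono := pvSorted_getD_mono bs hsorted (j := k) (k := i - 1) (by omega) (by omega)
      rw [List.getD_eq_getElem bs 0 hk, hkeq] at hmono
      have hnlo : ¬ lov ≤ bs.getD (i - 1) 0 := fun h => hcond ⟨hipos, h⟩
      omega
    have hempty' : boundaries.filter p = [] :=
      List.Perm.eq_nil (hfilt.trans (hempty ▸ List.Perm.refl _))
    rw [hempty']
    have hnc : (decide (0 < i) && decide (lov ≤ bs.getD (i - 1) 0)) = false := by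
      rcases Nat.eq_zero_or_pos i with h0 | hpos
      · rw [decide_eq_false (by omega : ¬ 0 < i), Bool.false_and]
      · have hnlo : ¬ lov ≤ bs.getD (i - 1) 0 := fun h => hcond ⟨hpos, h⟩
        rw [decide_eq_false hnlo, Bool.and_false]
    rw [hnc]
    simp [PySem.List.max?]
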